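-- pv_equiv track=rewrite | github.com/bacovcin/Akkadian-Verbal-Morphology | VerbalMorph.py | Nassim
-- ===== SOURCE A (Python) =====
-- def Nassim(form):
-- 	vowels = ['a','e','i','u','V']
-- 	for i in range(len(form)):
-- 		try:
-- 			if (form[i] == 'n') and (form[i+1] not in vowels):
-- 				form = form[:i] + form[i+1] + form[i+1:]
-- 		except:
-- 			continue
-- 	return form
-- ===== SOURCE B (Python) =====
-- def Nassim(form):
--     vowels = set('aeiuV')
--     return ''.join(
--         b if a == 'n' and b not in vowels else a
--         for a, b in zip(form, form[1:])
--     ) + form[-1:]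
-- ===== Notes on version B (the rewrite author's own statement) =====
-- stated objective: alternative
-- what changed: B replaces A's index loop that rebuilds the string by slicing at every match with a single pass that zips each character with its successor and replaces an assimilating nasal before a non-vowel by that successor.
import Mathlib
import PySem

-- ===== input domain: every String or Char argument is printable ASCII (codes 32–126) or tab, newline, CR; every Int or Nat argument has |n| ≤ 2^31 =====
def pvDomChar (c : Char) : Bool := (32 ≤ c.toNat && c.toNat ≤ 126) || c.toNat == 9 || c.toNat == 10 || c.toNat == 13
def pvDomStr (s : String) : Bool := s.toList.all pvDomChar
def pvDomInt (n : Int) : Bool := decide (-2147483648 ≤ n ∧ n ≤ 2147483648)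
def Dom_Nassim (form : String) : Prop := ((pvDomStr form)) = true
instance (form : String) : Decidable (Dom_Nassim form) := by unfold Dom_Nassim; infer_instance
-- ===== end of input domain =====

-- B replaces A's index loop that rebuilds the string by slicing at each replacement with a
-- single pass pairing each character with its successor (zip); return value only.

-- ===== PORT A =====
-- loop body of A: try: if form[i]=='n' and form[i+1] not in vowels: form = form[:i]+form[i+1]+form[i+1:] except: continue
def NassimStep (s : List Char) (i : Int) : List Char :=
  match PySem.List.pyGet? s i with
  | none => s
  | some c =>
    if c = 'n' then
      match PySem.List.pyGet? s (i + 1) with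
      | none => s   -- IndexError on form[i+1], caught: continue
      | some d =>
        if d ∉ (['a','e','i','u','V'] : List Char) then
          PySem.List.slice s none (some i) ++ d :: PySem.List.slice s (some (i + 1)) none
        else s
    else s

def Nassim (form : String) : String :=
  String.mk (List.foldl NassimStep form.toList
    (PySem.List.pyRange 0 (form.toList.length : Int) 1))

-- ===== PORT B =====
def Nassim_alt (form : String) : String :=
  let vowels : PySem.Set Char := PySem.Set.ofList ['a','e','i','u','V']
  let l := form.toList
  String.mk
    (((l.zip (PySem.List.slice l (some 1) none)).map
        (fun p => if p.1 = 'n' ∧ p.2 ∉ vowels then p.2 else p.1))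
      ++ PySem.List.slice l (some (-1)) none)

-- ===== PRECONDITION & SPEC =====
def Spec_Nassim (form : String) (out : String) : Prop := out = Nassim_alt form
instance (form : String) (out : String) : Decidable (Spec_Nassim form out) := by unfold Spec_Nassim; infer_instance

-- ===== CLAIM (what is proved, stated in full; the proofs are below) =====
def Claim_equal_Nassim : Prop := ∀ (form : String), Dom_Nassim form → Spec_Nassim form (Nassim form)

-- ===== LEMMAS AND PROOFS =====

-- the pointwise map both programs compute: each 'n' followed by a non-vowel becomes that follower
def nmap : List Char → List Char
  | [] => []
  | [c] => [c]
  | c :: d :: r =>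
      (if c = 'n' ∧ d ∉ (['a','e','i','u','V'] : List Char) then d else c) :: nmap (d :: r)

theorem nmap_zip : ∀ (l : List Char),
    ((l.zip l.tail).map
        (fun p => if p.1 = 'n' ∧ p.2 ∉ (['a','e','i','u','V'] : List Char) then p.2 else p.1))
      ++ (l.drop (l.length - 1)) = nmap l := by
  intro l
  induction l with
  | nil => simp [nmap]
  | cons c t ih =>
    cases t with
    | nil => simp [nmap]
    | cons d r =>
      simp only [nmap, List.tail_cons, List.zip_cons_cons, List.map_cons, List.cons_append]
      rw [← ih]
      simp [List.tail_cons]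

theorem nassim_loop : ∀ (t u : List Char),
    List.foldl NassimStep (u ++ t)
      (PySem.List.pyRange (u.length : Int) ((u.length : Int) + (t.length : Int)) 1)
    = u ++ nmap t := by
  intro t
  induction t with
  | nil =>
    intro u
    rw [PySem.List.pyRange_one_eq_nil (by simp)]
    simp [nmap]
  | cons c t' ih =>
    intro u
    rw [PySem.List.pyRange_one_cons
      (by push_cast [List.length_cons]; omega :
        (u.length : Int) < (u.length : Int) + ((c :: t').length : Int))]
    simp only [List.foldl_cons]
    have hget : PySem.List.pyGet? (u ++ c :: t') (u.length : Int) = some c :=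
      PySem.List.pyGet?_append_length u t' c
    cases t' with
    | nil =>
      have hnone : PySem.List.pyGet? (u ++ [c]) ((u.length : Int) + 1) = none := by
        rw [PySem.List.pyGet?_eq_none_iff]
        simp [PySem.Raise.InRange]
      have hstep : NassimStep (u ++ [c]) (u.length : Int) = u ++ [c] := by
        simp [NassimStep, hnone]
      rw [hstep, PySem.List.pyRange_one_eq_nil
        (by push_cast [List.length_cons, List.length_nil]; omega)]
      simp [nmap]
    | cons d r =>
      have hget1 : PySem.List.pyGet? (u ++ c :: d :: r) ((u.length : Int) + 1) = some d := by
        have := PySem.List.pyGet?_append_right (pre := u) (ys := c :: d :: r) (k := 1)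
        simpa using this
      set e : Char := if c = 'n' ∧ d ∉ (['a','e','i','u','V'] : List Char) then d else c with he
      have hs1 : PySem.List.slice (u ++ c :: d :: r) none (some (u.length : Int)) = u := by
        rw [PySem.List.slice_to_natCast]; simp
      have hs2 : PySem.List.slice (u ++ c :: d :: r) (some ((u.length : Int) + 1)) none
          = d :: r := by
        have h1 : ((u.length : Int) + 1) = ((u.length + 1 : Nat) : Int) := by push_cast; ring
        have h2 : u ++ c :: d :: r = (u ++ [c]) ++ d :: r := by simp
        have h3 : u.length + 1 = (u ++ [c]).length := by simp
        rw [h1, PySem.List.slice_from_natCast, h2, h3, List.drop_left]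
      have hstep : NassimStep (u ++ c :: d :: r) (u.length : Int) = (u ++ [e]) ++ d :: r := by
        by_cases h1 : c = 'n'
        · by_cases h2 : d ∈ (['a','e','i','u','V'] : List Char)
          · have hec : e = c := by rw [he, if_neg (fun h => h.2 h2)]
            have hd : d = 'a' ∨ d = 'e' ∨ d = 'i' ∨ d = 'u' ∨ d = 'V' := by simpa using h2
            simp only [NassimStep, hget, hget1, if_pos h1]
            rw [if_neg (by tauto), hec]
            simp
          · have hed : e = d := by rw [he, if_pos ⟨h1, h2⟩]
            simp only [NassimStep, hget, hget1, if_pos h1, h2, not_false_eq_true, if_true]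
            rw [hs1, hs2, hed]
            simp
        · have hec : e = c := by rw [he, if_neg (fun h => h1 h.1)]
          simp [NassimStep, hget, h1, hec]
      rw [hstep]
      have hlen : ((u.length : Int) + 1) = (((u ++ [e]).length : Nat) : Int) := by
        push_cast [List.length_append, List.length_cons, List.length_nil]; omega
      have hend : (u.length : Int) + ((c :: d :: r).length : Int)
          = (((u ++ [e]).length : Nat) : Int) + (((d :: r).length : Nat) : Int) := by
        push_cast [List.length_append, List.length_cons, List.length_nil]; omega
      rw [hlen, hend, ih (u ++ [e])]
      have hn : nmap (c :: d :: r) = e :: nmap (d :: r) := by rw [nmap, he]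
      rw [hn]
      simp

-- ===== VERDICT (by name: the statement is the Claim_ definition above) =====
theorem Nassim_spec : Claim_equal_Nassim := by
  intro form _
  unfold Spec_Nassim Nassim Nassim_alt
  have hA := nassim_loop form.toList []
  simp only [List.nil_append, List.length_nil, Nat.cast_zero, zero_add] at hA
  rw [hA]
  rw [show (PySem.Set.ofList ['a','e','i','u','V'] : PySem.Set Char) = ['a','e','i','u','V']
    from by decide]
  congr 1
  rw [← nmap_zip form.toList, PySem.List.slice_from_one, PySem.List.slice_from_neg_one]
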